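-- pv_equiv track=rewrite | github.com/songkg7/1day-1algorithm | programmers/kakao/python/방금그곡_fail.py | play_score
-- ===== SOURCE A (Python) =====
-- def play_score(play_time, score):
--     play_song = ''
--     while play_time > 0:
--         for melody in score:
--             if play_time == 0:
--                 break
--             play_song += melody
--             if melody != '#':
--                 play_time -= 1
--     return play_song
-- ===== SOURCE B (Python) =====
-- def play_score(play_time, score):
--     # closed form: n notes per pass of score; q full passes, then a partial
--     # pass up to the rem-th note (dropping trailing '#'s of the last pass)
--     n = sum(1 for c in score if c != '#')
--     if play_time <= 0:
--         return ''
--     q, r = divmod(play_time - 1, n)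
--     rem = r + 1
--     out = [score * q]
--     cnt = 0
--     for c in score:
--         out.append(c)
--         if c != '#':
--             cnt += 1
--             if cnt == rem:
--                 break
--     return ''.join(out)
-- ===== Notes on version B (the rewrite author's own statement) =====
-- stated objective: alternative
-- what changed: Replaces A's note-by-note while/for simulation with a divmod closed form: it computes the number of full repetitions of score directly, then a single partial scan emits up to the remainder-th note (dropping the trailing '#'s of the last pass).
import Mathlib
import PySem

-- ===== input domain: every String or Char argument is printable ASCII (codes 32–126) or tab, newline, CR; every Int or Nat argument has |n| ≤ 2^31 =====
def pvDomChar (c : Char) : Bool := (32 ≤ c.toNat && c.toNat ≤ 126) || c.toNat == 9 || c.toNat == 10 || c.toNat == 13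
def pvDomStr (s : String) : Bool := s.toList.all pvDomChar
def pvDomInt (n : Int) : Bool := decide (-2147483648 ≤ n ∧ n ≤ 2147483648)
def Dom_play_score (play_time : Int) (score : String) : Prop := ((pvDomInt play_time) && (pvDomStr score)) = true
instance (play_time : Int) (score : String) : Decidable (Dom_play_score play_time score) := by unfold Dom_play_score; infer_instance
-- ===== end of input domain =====

-- B replaces A's note-by-note while/for simulation by a divmod closed form (full passes + one partial scan); objective: an alternative closed-form decomposition.
-- A diverges when play_time > 0 and score has no non-'#' character; Pre_ excludes exactly those inputs (B raises ZeroDivisionError there).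


-- ===== PORT A =====
-- the inner 'for melody in score' loop, with its 'if play_time == 0: break'
def passA : List Char → Int → List Char → Int × List Char
  | [], t, acc => (t, acc)
  | c :: cs, t, acc =>
    if t = 0 then (t, acc)
    else if c = '#' then passA cs t (acc ++ [c])
    else passA cs (t - 1) (acc ++ [c])

-- the outer 'while play_time > 0' loop; fuel bounds the number of passes
-- (each pass removes at least one note when Pre_ holds, so play_time.toNat passes suffice)
def loopA : Nat → Int → List Char → List Char → List Char
  | 0, _, _, acc => acc
  | fuel + 1, t, score, acc =>
    if 0 < t then
      let p := passA score t acc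
      loopA fuel p.1 score p.2
    else acc

def play_score (play_time : Int) (score : String) : String :=
  String.mk (loopA play_time.toNat play_time score.toList [])

-- ===== PORT B =====
def cntNotes (l : List Char) : Int := ((l.filter (fun c => c ≠ '#')).length : Int)

-- the partial final pass: emit chars, stop right after the rem-th note
def takeNotes : List Char → Int → List Char
  | [], _ => []
  | c :: cs, r =>
    if c = '#' then c :: takeNotes cs r
    else if r ≤ 1 then [c]
    else c :: takeNotes cs (r - 1)

def play_score_alt (play_time : Int) (score : String) : String :=
  let n := cntNotes score.toList
  if play_time ≤ 0 then ""
  else if n = 0 then ""  -- totality guard: Python B raises ZeroDivisionError here; excluded by Pre_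
  else
    let q := PySem.Int.floordiv (play_time - 1) n
    let rem := PySem.Int.mod (play_time - 1) n + 1
    String.mk ((List.replicate q.toNat score.toList).flatten ++ takeNotes score.toList rem)

-- ===== PRECONDITION & SPEC =====
-- Pre_ excludes exactly the inputs on which A never returns (infinite loop):
-- play_time > 0 with a score containing no non-'#' character.
def Pre_play_score (play_time : Int) (score : String) : Prop :=
  play_time ≤ 0 ∨ (score.toList.any (fun c => c ≠ '#')) = true
instance (play_time : Int) (score : String) : Decidable (Pre_play_score play_time score) := by
  unfold Pre_play_score; infer_instance
def pvWitness_play_score : Int × String := (5, "AB#C")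

def Spec_play_score (play_time : Int) (score : String) (out : String) : Prop := out = play_score_alt play_time score
instance (play_time : Int) (score : String) (out : String) : Decidable (Spec_play_score play_time score out) := by unfold Spec_play_score; infer_instance

-- ===== CLAIM (what is proved, stated in full; the proofs are below) =====
def Claim_equal_play_score : Prop := ∀ (play_time : Int) (score : String), Dom_play_score play_time score → Pre_play_score play_time score → Spec_play_score play_time score (play_score play_time score)

-- ===== LEMMAS AND PROOFS =====

theorem cntNotes_nonneg (l : List Char) : 0 ≤ cntNotes l := by
  unfold cntNotes; positivity

theorem cntNotes_cons (c : Char) (cs : List Char) :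
    cntNotes (c :: cs) = if c = '#' then cntNotes cs else cntNotes cs + 1 := by
  unfold cntNotes
  by_cases h : c = '#' <;> simp [h]

theorem cntNotes_pos_of_any (l : List Char) (h : l.any (fun c => c ≠ '#') = true) :
    0 < cntNotes l := by
  unfold cntNotes
  rcases List.any_eq_true.mp h with ⟨c, hc, hne⟩
  have : c ∈ l.filter (fun c => c ≠ '#') := List.mem_filter.mpr ⟨hc, hne⟩
  have := List.length_pos_of_mem this
  exact_mod_cast this

theorem passA_zero (l : List Char) (acc : List Char) : passA l 0 acc = (0, acc) := by
  cases l <;> simp [passA]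

theorem passA_formula (l : List Char) (t : Int) (acc : List Char) (ht : 0 < t) :
    passA l t acc =
      if t ≤ cntNotes l then (0, acc ++ takeNotes l t)
      else (t - cntNotes l, acc ++ l) := by
  induction l generalizing t acc with
  | nil =>
    simp only [passA, cntNotes, List.filter_nil, List.length_nil, Int.natCast_zero]
    rw [if_neg (by omega)]
    simp
  | cons c cs ih =>
    have htne : t ≠ 0 := by omega
    by_cases hc : c = '#'
    · have := ih t (acc ++ [c]) ht
      simp only [passA, htne, if_false, hc, if_true, cntNotes_cons, takeNotes]
      split_ifs <;> simp_all
    · by_cases h1 : t = 1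
      · subst h1
        have hle : (1:Int) ≤ cntNotes cs + 1 := by have := cntNotes_nonneg cs; omega
        simp [passA, hc, passA_zero, cntNotes_cons, takeNotes, hle]
      · have ht' : 0 < t - 1 := by omega
        have := ih (t - 1) (acc ++ [c]) ht'
        simp only [passA, htne, if_false, hc, this, cntNotes_cons, takeNotes]
        have hnle : ¬ t ≤ 1 := by omega
        split_ifs with h2 h3 h3 <;> simp_all <;> omega

theorem loopA_nonpos (fuel : Nat) (t : Int) (score acc : List Char) (ht : ¬ 0 < t) :
    loopA fuel t score acc = acc := by
  cases fuel <;> simp [loopA, ht]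

theorem loopA_formula (fuel : Nat) (t : Int) (score acc : List Char)
    (ht : 0 < t) (hn : 0 < cntNotes score) (hfuel : t.toNat ≤ fuel) :
    loopA fuel t score acc =
      acc ++ (List.replicate (PySem.Int.floordiv (t - 1) (cntNotes score)).toNat score).flatten
          ++ takeNotes score (PySem.Int.mod (t - 1) (cntNotes score) + 1) := by
  induction fuel generalizing t acc with
  | zero => omega
  | succ fuel ih =>
    set n := cntNotes score with hn_def
    have hfd : PySem.Int.floordiv (t - 1) n = (t - 1) / n :=
      PySem.Int.floordiv_eq_ediv_of_pos hn
    have hmd : PySem.Int.mod (t - 1) n = (t - 1) % n :=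
      PySem.Int.mod_eq_emod_of_pos hn
    by_cases hle : t ≤ n
    · -- last (partial) pass
      have hpass := passA_formula score t acc ht
      rw [if_pos hle] at hpass
      have hq : (t - 1) / n = 0 := Int.ediv_eq_zero_of_lt (by omega) (by omega)
      have hr : (t - 1) % n = t - 1 := Int.emod_eq_of_lt (by omega) (by omega)
      simp only [loopA, ht, if_pos, hpass]
      rw [loopA_nonpos fuel 0 score _ (by omega)]
      rw [hfd, hmd, hq, hr]
      simp
    · -- a full pass, then recurse
      have hpass := passA_formula score t acc ht
      rw [if_neg hle] at hpass
      have ht' : 0 < t - n := by omega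
      have hfuel' : (t - n).toNat ≤ fuel := by omega
      have := ih (t - n) (acc ++ score) ht' hfuel'
      simp only [loopA, ht, if_pos, hpass]
      rw [this]
      have hq : (t - 1) / n = (t - n - 1) / n + 1 := by
        have : t - 1 = (t - n - 1) + 1 * n := by ring
        rw [this, Int.add_mul_ediv_right _ _ (by omega)]
      have hr : (t - 1) % n = (t - n - 1) % n := by
        have : t - 1 = (t - n - 1) + n * 1 := by ring
        rw [this, Int.add_mul_emod_self_left]
      have hfd' : PySem.Int.floordiv (t - n - 1) n = (t - n - 1) / n :=
        PySem.Int.floordiv_eq_ediv_of_pos hn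
      have hmd' : PySem.Int.mod (t - n - 1) n = (t - n - 1) % n :=
        PySem.Int.mod_eq_emod_of_pos hn
      rw [hfd, hmd, hq, hr, hfd', hmd']
      have hq0 : 0 ≤ (t - n - 1) / n := Int.ediv_nonneg (by omega) (by omega)
      have htn : ((t - n - 1) / n + 1).toNat = ((t - n - 1) / n).toNat + 1 := by omega
      rw [htn, List.replicate_succ, List.flatten_cons]
      simp

-- ===== VERDICT (by name: the statement is the Claim_ definition above) =====
theorem play_score_spec : Claim_equal_play_score := by
  intro t score _ hpre
  unfold Spec_play_score play_score play_score_alt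
  by_cases ht : t ≤ 0
  · rw [loopA_nonpos _ _ _ _ (by omega)]
    simp [ht]
    rfl
  · have ht' : 0 < t := by omega
    have hnote : (score.toList.any (fun c => c ≠ '#')) = true := by
      rcases hpre with h | h
      · omega
      · exact h
    have hn : 0 < cntNotes score.toList := cntNotes_pos_of_any _ hnote
    rw [loopA_formula t.toNat t score.toList [] ht' hn (le_refl _)]
    rw [if_neg (by omega), if_neg (by omega)]
    simp
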